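-- pv_equiv track=rewrite | github.com/imalgrab/uni | SI/lista01/zad5.py | opt_dist
-- ===== SOURCE A (Python) =====
-- def opt_dist(l, d):
--     s = [0]
--     for i in range(len(l)):
--         s.append(s[i] + l[i])
--     res = len(l)
--     for i in range(len(l) - d + 1):
--         left = i
--         right = i + d - 1
--         before = s[left]  # suma jedynek w (0, l-1)
--         curr = s[right+1] - s[left]  # suma jedynek w (l, r)
--         after = s[len(l)] - s[right+1]  # suma jedynek w (r+1, n-1)
--         res = min(res, before + after + d - curr)
--     return res
-- ===== SOURCE B (Python) =====
-- def opt_dist(l, d):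
--     n = len(l)
--     if n - d + 1 <= 0:
--         return n
--     total = sum(l)
--     w = sum(l[:d])
--     best = w
--     for i in range(n - d):
--         w += l[i + d] - l[i]
--         if w > best:
--             best = w
--     return min(n, total + d - 2 * best)
-- ===== Notes on version B (the rewrite author's own statement) =====
-- stated objective: faster
-- what changed: Replaced the prefix-sum array and per-window recomputation by a single O(1)-extra-space sliding window that tracks the maximum window sum, returning min(n, total + d - 2*max), which equals A's min over windows of before+after+d-curr; the constant-factor win comes from not building the length-(n+1) prefix list by repeated append and doing one subscript pair per step instead of three.
import Mathlib
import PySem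

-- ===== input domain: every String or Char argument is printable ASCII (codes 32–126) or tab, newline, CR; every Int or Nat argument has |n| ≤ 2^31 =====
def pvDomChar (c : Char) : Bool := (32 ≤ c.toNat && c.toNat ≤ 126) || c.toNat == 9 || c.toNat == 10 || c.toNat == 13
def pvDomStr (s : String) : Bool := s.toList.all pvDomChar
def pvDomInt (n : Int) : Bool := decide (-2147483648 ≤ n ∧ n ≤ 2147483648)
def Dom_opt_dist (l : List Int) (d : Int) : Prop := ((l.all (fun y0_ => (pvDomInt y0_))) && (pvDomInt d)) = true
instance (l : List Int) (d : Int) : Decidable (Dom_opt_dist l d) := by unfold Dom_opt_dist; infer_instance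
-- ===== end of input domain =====

-- B replaces A's prefix-sum array by an O(1)-extra-space sliding window tracking the
-- maximum window sum; return value only, neither version mutates its arguments.

-- ===== PORT A =====
def opt_dist (l : List Int) (d : Int) : Int :=
  let s : List Int :=
    (PySem.List.pyRange 0 (l.length : Int) 1).foldl
      (fun s i => s ++ [PySem.List.pyGetD s i 0 + PySem.List.pyGetD l i 0]) [0]
  (PySem.List.pyRange 0 ((l.length : Int) - d + 1) 1).foldl
    (fun res i =>
      let left := i
      let right := i + d - 1
      let before := PySem.List.pyGetD s left 0
      let curr := PySem.List.pyGetD s (right + 1) 0 - PySem.List.pyGetD s left 0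
      let after := PySem.List.pyGetD s (l.length : Int) 0 - PySem.List.pyGetD s (right + 1) 0
      min res (before + after + d - curr)) (l.length : Int)

-- ===== PORT B =====
def opt_dist_alt (l : List Int) (d : Int) : Int :=
  let n : Int := l.length
  if n - d + 1 ≤ 0 then n
  else
    let total := l.sum
    let w0 := (PySem.List.slice l none (some d)).sum
    let wb :=
      (PySem.List.pyRange 0 (n - d) 1).foldl
        (fun (p : Int × Int) i =>
          let w := p.1 + PySem.List.pyGetD l (i + d) 0 - PySem.List.pyGetD l i 0
          (w, if w > p.2 then w else p.2)) (w0, w0)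
    min n (total + d - 2 * wb.2)

-- ===== PRECONDITION & SPEC =====
-- A raises IndexError for every d < 0 (its window loop runs past the prefix-sum list);
-- Pre_ excludes exactly those inputs.
def Pre_opt_dist (l : List Int) (d : Int) : Prop := 0 ≤ d
instance (l : List Int) (d : Int) : Decidable (Pre_opt_dist l d) := by
  unfold Pre_opt_dist; infer_instance

def pvWitness_opt_dist : List Int × Int := ([1, 0, 1, 1], 2)

def Spec_opt_dist (l : List Int) (d : Int) (out : Int) : Prop := out = opt_dist_alt l d
instance (l : List Int) (d : Int) (out : Int) : Decidable (Spec_opt_dist l d out) := by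
  unfold Spec_opt_dist; infer_instance

-- ===== CLAIM (what is proved, stated in full; the proofs are below) =====
def Claim_equal_opt_dist : Prop :=
  ∀ (l : List Int) (d : Int), Dom_opt_dist l d → Pre_opt_dist l d →
    Spec_opt_dist l d (opt_dist l d)

-- ===== LEMMAS AND PROOFS =====

/-- Prefix sum of the first `j` elements. -/
def pvS (l : List Int) (j : Nat) : Int := (l.take j).sum

/-- Window sum of the `dn`-wide window starting at `i`. -/
def pvW (l : List Int) (dn i : Nat) : Int := pvS l (i + dn) - pvS l i

/-- A's prefix-sum list is the table of `pvS`. -/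
lemma pvA_prefix (l : List Int) (j : Nat) (hj : j ≤ l.length) :
    (PySem.List.pyRange 0 (j : Int) 1).foldl
      (fun s i => s ++ [PySem.List.pyGetD s i 0 + PySem.List.pyGetD l i 0]) [0]
    = (List.range (j + 1)).map (pvS l) := by
  induction j with
  | zero => simp [PySem.List.pyRange_one_eq_nil, pvS]
  | succ j ih =>
    have hj' : j ≤ l.length := Nat.le_of_succ_le hj
    have hcast : ((j + 1 : Nat) : Int) = (j : Int) + 1 := by push_cast; ring
    rw [hcast, PySem.List.pyRange_one_succ_right (by positivity), List.foldl_append,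
      ih hj']
    simp only [List.foldl_cons, List.foldl_nil, PySem.List.pyGetD_natCast]
    rw [PySem.List.getD_map_range _ _ _ _ (by omega)]
    have hl : l.getD j 0 = l[j]'(by omega) := List.getD_eq_getElem l 0 (by omega)
    rw [hl, List.range_succ (n := j + 1), List.map_append]
    simp only [List.map_cons, List.map_nil, List.append_cancel_left_eq, List.cons.injEq,
      and_true]
    rw [pvS, pvS, List.sum_take_succ l j (by omega)]

lemma pvFoldl_max_shift : ∀ (ws : List Int) (x w : Int),
    List.foldl max (max x w) ws = max x (List.foldl max w ws) := by
  intro ws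
  induction ws with
  | nil => intro x w; rfl
  | cons y t ih =>
    intro x w
    simp only [List.foldl_cons]
    rw [max_assoc, ih]

/-- Folding `min` of the antitone map `w ↦ c - 2*w` equals `c - 2*max`. -/
lemma pvFold_min_max (c : Int) : ∀ (ws : List Int) (a x : Int),
    List.foldl (fun r w => min r (c - 2 * w)) (min a (c - 2 * x)) ws
      = min a (c - 2 * List.foldl max x ws) := by
  intro ws
  induction ws with
  | nil => intro a x; rfl
  | cons w t ih =>
    intro a x
    simp only [List.foldl_cons]
    rw [ih (min a (c - 2 * x)) w, pvFoldl_max_shift]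
    have := le_total x (List.foldl max w t)
    omega

/-- B's pair fold computes (last window sum, running max of window sums). -/
lemma pvB_pair (l : List Int) (dn : Nat) : ∀ (m : Nat), m + dn ≤ l.length →
    List.foldl
      (fun (p : Int × Int) (j : Nat) =>
        let w := p.1 + l.getD (j + dn) 0 - l.getD j 0
        (w, if w > p.2 then w else p.2)) (pvW l dn 0, pvW l dn 0) (List.range m)
    = (pvW l dn m,
       List.foldl (fun b (j : Nat) => max b (pvW l dn (j + 1))) (pvW l dn 0) (List.range m)) := by
  intro m
  induction m with
  | zero => intro _; rfl
  | succ m ih =>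
    intro hm
    rw [List.range_succ, List.foldl_append, List.foldl_append, ih (by omega)]
    simp only [List.foldl_cons, List.foldl_nil]
    have h1 : l.getD (m + dn) 0 = l[m + dn]'(by omega) := List.getD_eq_getElem l 0 (by omega)
    have h2 : l.getD m 0 = l[m]'(by omega) := List.getD_eq_getElem l 0 (by omega)
    have hw : pvW l dn m + l.getD (m + dn) 0 - l.getD m 0 = pvW l dn (m + 1) := by
      rw [h1, h2]
      simp only [pvW, pvS]
      rw [show m + 1 + dn = (m + dn) + 1 by omega,
        List.sum_take_succ l (m + dn) (by omega), List.sum_take_succ l m (by omega)]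
      ring
    simp only [hw, Prod.mk.injEq]
    refine ⟨by trivial, (max_def_lt _ _).symm⟩

lemma pv_main (l : List Int) (d : Int) (hd : 0 ≤ d) :
    opt_dist l d = opt_dist_alt l d := by
  set n := l.length with hn
  obtain ⟨dn, rfl⟩ : ∃ dn : Nat, d = (dn : Int) := ⟨d.toNat, (Int.toNat_of_nonneg hd).symm⟩
  by_cases hcase : n < dn
  · -- no windows: A's range is empty, B takes the early branch
    rw [opt_dist, opt_dist_alt]
    rw [PySem.List.pyRange_one_eq_nil (a := 0) (b := (l.length : Int) - (dn : Int) + 1) (by omega)]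
    simp only [List.foldl_nil]
    rw [if_pos (by omega)]
  · have hdn : dn ≤ n := by omega
    set m := n - dn with hm
    have hmdn : m + dn = n := by omega
    set c : Int := l.sum + dn with hc
    -- A's side
    rw [opt_dist]
    simp only []
    rw [pvA_prefix l n le_rfl]
    have hk : ((n : Int) - dn + 1) = ((m + 1 : Nat) : Int) := by push_cast; omega
    rw [hk, PySem.List.pyRange_zero_nat, List.foldl_map]
    have hbody : ∀ (r : Int), ∀ j ∈ List.range (m + 1),
        (fun res (i : Int) =>
          min res (PySem.List.pyGetD ((List.range (n + 1)).map (pvS l)) i 0 +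
            (PySem.List.pyGetD ((List.range (n + 1)).map (pvS l)) (n : Int) 0 -
              PySem.List.pyGetD ((List.range (n + 1)).map (pvS l)) (i + dn - 1 + 1) 0) + dn -
            (PySem.List.pyGetD ((List.range (n + 1)).map (pvS l)) (i + dn - 1 + 1) 0 -
              PySem.List.pyGetD ((List.range (n + 1)).map (pvS l)) i 0))) r (j : Int)
        = min r (c - 2 * pvW l dn j) := by
      intro r j hj
      rw [List.mem_range] at hj
      have hji : ((j : Int) + dn - 1 + 1) = ((j + dn : Nat) : Int) := by push_cast; ring
      simp only [hji, PySem.List.pyGetD_natCast]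
      rw [PySem.List.getD_map_range _ _ _ _ (by omega), PySem.List.getD_map_range _ _ _ _ (by omega),
        PySem.List.getD_map_range _ _ _ _ (by omega)]
      have hSn : pvS l n = l.sum := by simp [pvS, hn]
      rw [hSn]
      simp only [pvW, hc]
      ring_nf
    rw [PySem.List.foldl_congr_mem _ _ _ _ hbody]
    -- B's side
    rw [opt_dist_alt]
    rw [if_neg (by omega)]
    have hm' : ((n : Int) - dn) = ((m : Nat) : Int) := by omega
    rw [hm', PySem.List.pyRange_zero_nat]
    simp only [List.foldl_map]
    have hw0 : (PySem.List.slice l none (some (dn : Int))).sum = pvW l dn 0 := by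
      rw [PySem.List.slice_to l (by positivity)]
      simp [pvW, pvS]
    rw [hw0]
    have hbodyB : ∀ (p : Int × Int), ∀ j ∈ List.range m,
        (fun (p : Int × Int) (i : Int) =>
          let w := p.1 + PySem.List.pyGetD l (i + dn) 0 - PySem.List.pyGetD l i 0
          (w, if w > p.2 then w else p.2)) p (j : Int)
        = (fun (p : Int × Int) (j : Nat) =>
            let w := p.1 + l.getD (j + dn) 0 - l.getD j 0
            (w, if w > p.2 then w else p.2)) p j := by
      intro p j _
      have hji : ((j : Int) + dn) = ((j + dn : Nat) : Int) := by push_cast; ring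
      simp only [hji, PySem.List.pyGetD_natCast]
    rw [PySem.List.foldl_congr_mem _ _ _ _ hbodyB, pvB_pair l dn m (by omega)]
    -- both sides as min / max folds over the list of window sums
    have key := pvFold_min_max c ((List.range m).map (fun j => pvW l dn (j + 1)))
      ((l.length : Int)) (pvW l dn 0)
    simp only [List.foldl_map] at key
    simp only [List.range_succ_eq_map, List.foldl_cons, List.foldl_map, Nat.succ_eq_add_one]
    rw [key]

-- ===== VERDICT (by name: the statement is the Claim_ definition above) =====
theorem opt_dist_spec : Claim_equal_opt_dist := by
  intro l d _ hpre
  exact pv_main l d hpre
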